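-- pv_equiv track=rewrite | github.com/tobiasHeinke/monostyle | monostyle/spelling.py | lower_first
-- ===== SOURCE A (Python) =====
-- def lower_first(word):
--     """Lower case of first char in hyphened compound."""
--     new_word = []
--     for compound in word.split('-'):
--         if len(compound) != 0:
--             new_word.append(compound[0].lower() + compound[1:])
--         else:
--             new_word.append(compound)
--
--     return '-'.join(new_word)
-- ===== SOURCE B (Python) =====
-- def lower_first(word):
--     """Lower case of first char in hyphened compound."""
--     out = []
--     at_start = True
--     for ch in word:
--         out.append(ch.lower() if at_start else ch)
--         at_start = (ch == '-')
--     return ''.join(out)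
-- ===== Notes on version B (the rewrite author's own statement) =====
-- stated objective: simpler
-- what changed: Replaces the hyphen-split / per-segment transform / join structure with a single pass over the characters that lowercases a char exactly when it starts a segment, tracked by a boolean flag updated after each char.
import Mathlib
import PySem

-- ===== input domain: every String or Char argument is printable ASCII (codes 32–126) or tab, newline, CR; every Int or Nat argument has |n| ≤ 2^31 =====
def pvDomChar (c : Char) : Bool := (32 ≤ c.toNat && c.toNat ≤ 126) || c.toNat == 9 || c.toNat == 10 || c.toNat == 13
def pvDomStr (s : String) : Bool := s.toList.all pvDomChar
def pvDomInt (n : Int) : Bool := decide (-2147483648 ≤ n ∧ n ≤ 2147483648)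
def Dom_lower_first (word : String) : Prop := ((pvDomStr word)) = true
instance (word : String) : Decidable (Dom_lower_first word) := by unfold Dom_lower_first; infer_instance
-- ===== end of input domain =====

-- B replaces A's split('-')/transform/join over segments by one pass over the
-- characters with a segment-start flag (simpler decomposition, same cost).

-- ===== PORT A =====
-- compound[0].lower() + compound[1:]  (only reached when len(compound) != 0)
def pvLowerStep (compound : List Char) : List Char :=
  ((PySem.List.pyGet? compound 0).map PySem.Chars.lowerChar).toList ++
    PySem.List.slice compound (some 1) none

def lower_first (word : String) : String :=
  let new_word : List (List Char) :=
    (PySem.Chars.splitOn word.toList ['-']).foldl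
      (fun acc compound =>
        if compound.length ≠ 0 then acc ++ [pvLowerStep compound]
        else acc ++ [compound])
      []
  String.ofList (PySem.Chars.join ['-'] new_word)

-- ===== PORT B =====
def lower_first_alt (word : String) : String :=
  let res : List Char × Bool :=
    word.toList.foldl
      (fun st ch =>
        (st.1 ++ [if st.2 then PySem.Chars.lowerChar ch else ch], ch == '-'))
      ([], true)
  String.ofList res.1

-- ===== PRECONDITION & SPEC =====
def Spec_lower_first (word : String) (out : String) : Prop := out = lower_first_alt word
instance (word : String) (out : String) : Decidable (Spec_lower_first word out) := by unfold Spec_lower_first; infer_instance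

-- ===== CLAIM (what is proved, stated in full; the proofs are below) =====
def Claim_equal_lower_first : Prop := ∀ (word : String), Dom_lower_first word → Spec_lower_first word (lower_first word)

-- ===== LEMMAS AND PROOFS =====

/-- Simple recursive model of `word.split('-')`. -/
def pvSplit1 : List Char → List (List Char)
  | [] => [[]]
  | c :: cs =>
    if c = '-' then [] :: pvSplit1 cs
    else
      match pvSplit1 cs with
      | [] => [[c]]
      | y :: ys => (c :: y) :: ys

/-- Simple recursive model of B's pass: lowercase when the flag is set. -/
def pvF : List Char → Bool → List Char
  | [], _ => []
  | c :: cs, b => (if b then PySem.Chars.lowerChar c else c) :: pvF cs (c == '-')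

theorem pvSplit1_ne_nil (cs : List Char) : pvSplit1 cs ≠ [] := by
  cases cs with
  | nil => simp [pvSplit1]
  | cons c cs =>
    simp only [pvSplit1]
    split
    · simp
    · split <;> simp_all

theorem pvSplitOn_go_eq (fuel : Nat) (l cur : List Char) (acc : List (List Char))
    (h : l.length ≤ fuel) :
    PySem.Chars.splitOn.go ['-'] fuel l cur acc =
      acc.reverse ++
        (match pvSplit1 l with
         | [] => [cur.reverse]
         | y :: ys => (cur.reverse ++ y) :: ys) := by
  induction fuel generalizing l cur acc with
  | zero =>
    have : l = [] := by cases l <;> simp_all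
    subst this
    simp [PySem.Chars.splitOn.go, pvSplit1]
  | succ fuel ih =>
    cases l with
    | nil => simp [PySem.Chars.splitOn.go, pvSplit1]
    | cons c rest =>
      rw [PySem.Chars.splitOn.go]
      by_cases hc : c = '-'
      · subst hc
        have hpre : List.isPrefixOf ['-'] ('-' :: rest) = true := by
          simp [List.isPrefixOf]
        rw [if_pos hpre]
        simp only [List.length_cons] at h
        rw [ih (List.drop ['-'].length ('-' :: rest)) [] (cur.reverse :: acc) (by simp; omega)]
        have hne := pvSplit1_ne_nil rest
        cases hsp : pvSplit1 rest with
        | nil => exact absurd hsp hne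
        | cons y ys =>
          simp [pvSplit1, hsp]
      · have hpre : List.isPrefixOf ['-'] (c :: rest) = false := by
          simp [List.isPrefixOf]; intro h'; exact absurd h'.symm hc
        rw [if_neg (by simp [hpre])]
        simp only [List.length_cons] at h
        rw [ih rest (c :: cur) acc (by omega)]
        have hne := pvSplit1_ne_nil rest
        cases hsp : pvSplit1 rest with
        | nil => exact absurd hsp hne
        | cons y ys =>
          simp [pvSplit1, hc, hsp]

theorem pvSplitOn_eq (cs : List Char) : PySem.Chars.splitOn cs ['-'] = pvSplit1 cs := by
  rw [PySem.Chars.splitOn, pvSplitOn_go_eq (cs.length + 1) cs [] [] (by omega)]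
  have hne := pvSplit1_ne_nil cs
  cases hsp : pvSplit1 cs with
  | nil => exact absurd hsp hne
  | cons y ys => simp

/-- A's per-segment transform, on the list level. -/
def pvStep (compound : List Char) : List Char :=
  if compound.length ≠ 0 then pvLowerStep compound else compound

theorem pvStep_nil : pvStep [] = [] := by simp [pvStep]

theorem pvStep_cons :
    ∀ a cs, pvStep (a :: cs) = PySem.Chars.lowerChar a :: cs := by
  intro a cs
  simp [pvStep, pvLowerStep, PySem.List.pyGet?, PySem.List.pyIdx?, PySem.List.slice]

theorem pvFoldl_append (parts : List (List Char)) (acc : List (List Char)) :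
    (parts.foldl
      (fun acc compound =>
        if compound.length ≠ 0 then acc ++ [pvLowerStep compound]
        else acc ++ [compound]) acc) = acc ++ parts.map pvStep := by
  induction parts generalizing acc with
  | nil => simp
  | cons p ps ih =>
    simp only [List.foldl_cons, List.map_cons]
    rw [show (if p.length ≠ 0 then acc ++ [pvLowerStep p] else acc ++ [p]) = acc ++ [pvStep p] by
      unfold pvStep; split <;> rfl]
    rw [ih]; simp

theorem pvJoin_cons_head (a : Char) (x : List Char) (xs : List (List Char)) :
    PySem.Chars.join ['-'] ((a :: x) :: xs) = a :: PySem.Chars.join ['-'] (x :: xs) := by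
  cases xs <;> simp [PySem.Chars.join, List.intercalate, List.intersperse]

theorem pvLowerChar_dash : PySem.Chars.lowerChar '-' = '-' := by decide

/-- Coupled characterisation of A's join∘map∘split against B's single pass. -/
theorem pvMain (cs : List Char) :
    ∀ y ys, pvSplit1 cs = y :: ys →
      PySem.Chars.join ['-'] (pvStep y :: (ys.map pvStep)) = pvF cs true ∧
      PySem.Chars.join ['-'] (y :: (ys.map pvStep)) = pvF cs false := by
  induction cs with
  | nil =>
    intro y ys h
    simp [pvSplit1] at h
    obtain ⟨h1, h2⟩ := h
    subst h1; subst h2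
    constructor <;> simp [pvStep_nil, pvF, PySem.Chars.join, List.intercalate]
  | cons c rest ih =>
    intro y ys h
    by_cases hc : c = '-'
    · subst hc
      simp only [pvSplit1] at h
      have hne := pvSplit1_ne_nil rest
      cases hsp : pvSplit1 rest with
      | nil => exact absurd hsp hne
      | cons z zs =>
        rw [hsp] at h
        obtain ⟨h1, h2⟩ := List.cons.inj h
        subst h1; subst h2
        obtain ⟨iha, _⟩ := ih z zs hsp
        have hjoin : PySem.Chars.join ['-'] ([] :: (z :: zs).map pvStep) =
            '-' :: PySem.Chars.join ['-'] (pvStep z :: zs.map pvStep) := by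
          simp [PySem.Chars.join, List.intercalate]
        constructor
        · rw [pvStep_nil, hjoin, iha]
          simp [pvF, pvLowerChar_dash]
        · rw [hjoin, iha]
          simp [pvF]
    · simp only [pvSplit1, if_neg hc] at h
      have hne := pvSplit1_ne_nil rest
      cases hsp : pvSplit1 rest with
      | nil => exact absurd hsp hne
      | cons z zs =>
        rw [hsp] at h
        obtain ⟨h1, h2⟩ := List.cons.inj h
        subst h1; subst h2
        obtain ⟨_, ihb⟩ := ih z zs hsp
        have hflag : (c == '-') = false := by simp [hc]
        constructor
        · rw [pvStep_cons c z, pvJoin_cons_head, ihb]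
          simp [pvF, hflag]
        · rw [pvJoin_cons_head, ihb]
          simp [pvF, hflag]

theorem pvFoldlB (cs : List Char) :
    ∀ (acc : List Char) (b : Bool),
      (cs.foldl
        (fun (st : List Char × Bool) ch =>
          (st.1 ++ [if st.2 then PySem.Chars.lowerChar ch else ch], ch == '-'))
        (acc, b)).1 = acc ++ pvF cs b := by
  induction cs with
  | nil => intro acc b; simp [pvF]
  | cons c rest ih =>
    intro acc b
    simp only [List.foldl_cons]
    rw [ih]
    simp [pvF]

-- ===== VERDICT (by name: the statement is the Claim_ definition above) =====
theorem lower_first_spec : Claim_equal_lower_first := by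
  intro word _
  unfold Spec_lower_first lower_first lower_first_alt
  simp only []
  rw [pvSplitOn_eq, pvFoldl_append]
  have hne := pvSplit1_ne_nil word.toList
  cases hsp : pvSplit1 word.toList with
  | nil => exact absurd hsp hne
  | cons y ys =>
    obtain ⟨ha, _⟩ := pvMain word.toList y ys hsp
    rw [pvFoldlB word.toList [] true]
    simp only [List.map_cons, List.nil_append] at ha ⊢
    rw [ha]
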